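-- pv_equiv track=rewrite | github.com/NikitaTolpikin/LanguageResearch | Code/v1/filter.py | rmht
-- ===== SOURCE A (Python) =====
-- def rmht(text):
-- 	i=0
-- 	while i<len(text):
-- 		if text[i]=='#':
-- 			endOfHashtagIndex = text.find(' ', i)
-- 			if endOfHashtagIndex == -1:
-- 				text = text[:i]
-- 			else:
-- 				text = text[:i]+text[endOfHashtagIndex:]
-- 		i+=1
-- 	return text
-- ===== SOURCE B (Python) =====
-- def rmht(text):
-- 	return ' '.join(tok.split('#')[0] for tok in text.split(' '))
-- ===== Notes on version B (the rewrite author's own statement) =====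
-- stated objective: faster
-- what changed: Replaced A's index-driven while-loop that repeatedly re-slices (copies) the string at each hashtag with a single split-on-spaces pass that truncates every token at its first '#' and rejoins with spaces.
import Mathlib
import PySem

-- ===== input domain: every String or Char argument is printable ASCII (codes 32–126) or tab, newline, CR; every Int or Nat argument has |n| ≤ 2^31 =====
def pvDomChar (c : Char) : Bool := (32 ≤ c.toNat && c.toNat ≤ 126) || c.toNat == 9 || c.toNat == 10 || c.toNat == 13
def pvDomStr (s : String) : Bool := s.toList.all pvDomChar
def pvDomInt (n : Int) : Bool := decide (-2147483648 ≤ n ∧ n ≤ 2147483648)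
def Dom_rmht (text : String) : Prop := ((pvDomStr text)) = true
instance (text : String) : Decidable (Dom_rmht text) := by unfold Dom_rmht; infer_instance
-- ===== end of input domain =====

-- B removes hashtags by splitting on spaces and cutting each token at its first '#' (idiomatic
-- split/join decomposition), instead of A's index loop that repeatedly re-slices the string.

-- ===== PORT A =====
-- A's while-loop: index i over the (mutating) string; on '#' splice out up to the next space.
-- fuel only makes the recursion structural: i grows by 1 each iteration and the string never
-- grows, so length+1 iterations always suffice (proved as part of loop_eq below).
def rmhtLoop : Nat → List Char → Nat → List Char
  | 0, s, _ => s
  | fuel + 1, s, i =>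
    if i < s.length then
      if PySem.Chars.pyGet? s (i : Int) = some '#' then
        if PySem.Chars.findFrom s [' '] (i : Int) none = -1 then
          rmhtLoop fuel (PySem.Chars.slice s none (some (i : Int))) (i + 1)
        else
          rmhtLoop fuel (PySem.Chars.slice s none (some (i : Int)) ++
            PySem.Chars.slice s (some (PySem.Chars.findFrom s [' '] (i : Int) none)) none) (i + 1)
      else rmhtLoop fuel s (i + 1)
    else s

def rmht (text : String) : String :=
  String.ofList (rmhtLoop (text.toList.length + 1) text.toList 0)

-- ===== PORT B =====
-- tok.split('#')[0]
def cutTok (tok : List Char) : List Char :=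
  PySem.List.pyGetD (PySem.Chars.splitOn tok ['#']) 0 []

-- ' '.join(tok.split('#')[0] for tok in text.split(' '))
def rmht_alt (text : String) : String :=
  String.ofList (PySem.Chars.join [' '] ((PySem.Chars.splitOn text.toList [' ']).map cutTok))

-- ===== PRECONDITION & SPEC =====
def Spec_rmht (text : String) (out : String) : Prop := out = rmht_alt text
instance (text : String) (out : String) : Decidable (Spec_rmht text out) := by unfold Spec_rmht; infer_instance

-- ===== CLAIM (what is proved, stated in full; the proofs are below) =====
def Claim_equal_rmht : Prop := ∀ (text : String), Dom_rmht text → Spec_rmht text (rmht text)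

-- ===== LEMMAS AND PROOFS =====

-- Facts about s.find(' ', i) when s[i] = '#', used by the equivalence proof.
theorem findFrom_space_spec (s : List Char) (i : Nat) (hi : i < s.length)
    (hhash : s[i]? = some '#')
    (hne : PySem.Chars.findFrom s [' '] (i : Int) none ≠ -1) :
    ∃ k : Nat, PySem.Chars.findFrom s [' '] (i : Int) none = (k : Int) ∧ i < k ∧ k < s.length ∧
      s[k]? = some ' ' ∧ ∀ j, i ≤ j → j < k → s[j]? ≠ some ' ' := by
  rw [PySem.Chars.findFrom_natCast s [' '] i (le_of_lt hi)] at hne ⊢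
  split at hne
  · exact absurd rfl hne
  · rename_i hfind
    have hge : 0 ≤ PySem.Chars.find (s.drop i) [' '] := by
      have := PySem.Chars.neg_one_le_find (s.drop i) [' ']
      omega
    obtain ⟨hpre, hmin⟩ := PySem.Chars.find_spec hge
    set f := PySem.Chars.find (s.drop i) [' '] with hf
    refine ⟨i + f.toNat, by omega, ?_, ?_, ?_, ?_⟩
    · -- i < i + f.toNat : f ≠ 0 because s[i] = '#'
      rcases List.cons_prefix_iff.mp hpre with ⟨l', hl', -⟩
      by_contra h
      have hf0 : f.toNat = 0 := by omega
      rw [hf0, List.drop_zero, List.drop_eq_getElem_cons hi] at hl'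
      simp only [List.getElem?_eq_getElem hi, Option.some.injEq] at hhash
      rw [hhash] at hl'
      simp at hl'
    · -- i + f.toNat < s.length
      rcases List.cons_prefix_iff.mp hpre with ⟨l', hl', -⟩
      have : f.toNat < (s.drop i).length := by
        by_contra h
        rw [List.drop_eq_nil_of_le (by omega)] at hl'
        simp at hl'
      have hlen : (s.drop i).length = s.length - i := by simp
      omega
    · -- s[i + f.toNat]? = some ' '
      rcases List.cons_prefix_iff.mp hpre with ⟨l', hl', -⟩
      have : (List.drop f.toNat (s.drop i)).head? = some ' ' := by rw [hl']; rfl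
      rwa [List.head?_drop, List.getElem?_drop] at this
    · -- minimality
      intro j hij hjk hjval
      have hj : ¬ [' '] <+: List.drop (j - i) (s.drop i) := hmin (j - i) (by omega)
      apply hj
      have hD : List.drop (j - i) (s.drop i) = List.drop j s := by
        rw [List.drop_drop]; congr 1; omega
      rw [hD]
      have hhead : (List.drop j s).head? = some ' ' := by rw [List.head?_drop]; exact hjval
      cases hD2 : List.drop j s with
      | nil => rw [hD2] at hhead; simp at hhead
      | cons a t =>
        rw [hD2] at hhead
        simp only [List.head?_cons, Option.some.injEq] at hhead
        exact List.cons_prefix_iff.mpr ⟨t, by rw [hhead], List.nil_prefix⟩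



-- The common specification: scan; on '#' drop up to (excluding) the next space.
def gSpec : List Char → List Char
  | [] => []
  | c :: cs =>
    if c = '#' then gSpec (cs.dropWhile (· ≠ ' '))
    else c :: gSpec cs
termination_by s => s.length
decreasing_by
  · have := List.length_dropWhile_le (fun x : Char => !decide (x = ' ')) cs; simp; omega
  · simp

-- --- B-side: PySem.Chars.splitOn on a single-character separator is List.splitOn ---

theorem go_single (c : Char) : ∀ (l : List Char) (fuel : Nat) (cur : List Char)
    (acc : List (List Char)), l.length ≤ fuel →
    PySem.Chars.splitOn.go [c] fuel l cur acc =
      acc.reverse ++ List.modifyHead (fun x => cur.reverse ++ x) (List.splitOn c l) := by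
  intro l
  induction l with
  | nil =>
    intro fuel cur acc _
    cases fuel <;> simp [PySem.Chars.splitOn.go, List.splitOn]
  | cons x rest ih =>
    intro fuel cur acc hfuel
    cases fuel with
    | zero => simp at hfuel
    | succ n =>
      rw [PySem.Chars.splitOn.go]
      by_cases hcx : c = x
      · subst hcx
        have hpre : [c].isPrefixOf (c :: rest) = true := by simp [List.isPrefixOf]
        rw [if_pos hpre]
        simp only [List.length_singleton, List.drop_one, List.tail_cons]
        rw [ih n [] (cur.reverse :: acc) (by simp at hfuel ⊢; omega)]
        simp [List.splitOn, List.splitOnP_cons]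
        rw [show (fun (x : List Char) => x) = id from rfl, List.modifyHead_id, id]
      · have hpre : [c].isPrefixOf (x :: rest) = false := by
          simp [List.isPrefixOf]; exact fun h => hcx h
        rw [if_neg (by simp [hpre])]
        rw [ih n (x :: cur) acc (by simp at hfuel ⊢; omega)]
        have hx : ((x == c) = false) := by simp; exact fun h => hcx h.symm
        cases hs : List.splitOn c rest with
        | nil => exact absurd hs (by simp [List.splitOn]; exact List.splitOnP_ne_nil _ _)
        | cons h t =>
          simp [List.splitOn, List.splitOnP_cons, hx]
          simp [List.splitOn] at hs
          simp [hs]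

theorem chars_splitOn_single (c : Char) (s : List Char) :
    PySem.Chars.splitOn s [c] = List.splitOn c s := by
  rw [show PySem.Chars.splitOn s [c] = PySem.Chars.splitOn.go [c] (s.length + 1) s [] [] from rfl]
  rw [go_single c s (s.length + 1) [] [] (by omega)]
  cases hs : List.splitOn c s with
  | nil => exact absurd hs (by simp [List.splitOn]; exact List.splitOnP_ne_nil _ _)
  | cons h t => simp

theorem splitOn_char (c : Char) (s : List Char) :
    List.splitOn c s = s.takeWhile (· ≠ c) ::
      (if s.dropWhile (· ≠ c) = [] then []
       else List.splitOn c (s.dropWhile (· ≠ c)).tail) := by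
  induction s with
  | nil => simp [List.splitOn]
  | cons x r ih =>
    by_cases hxc : x = c
    · subst hxc
      simp [List.splitOn, List.splitOnP_cons]
    · have hx : ((x == c) = false) := by simp [hxc]
      simp only [List.splitOn, List.splitOnP_cons, hx, if_neg, Bool.false_eq_true,
        not_false_eq_true] at *
      rw [ih]
      simp [hxc]

theorem cutTok_eq (tok : List Char) : cutTok tok = tok.takeWhile (· ≠ '#') := by
  unfold cutTok
  rw [chars_splitOn_single, splitOn_char]
  generalize (if tok.dropWhile (· ≠ '#') = [] then []
    else List.splitOn '#' (tok.dropWhile (· ≠ '#')).tail) = R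
  simp [PySem.List.pyGetD, PySem.List.pyGet?, PySem.List.pyIdx?]

-- join with a cons'd head character
theorem join_cons_head (sep p : List Char) (c : Char) (L : List (List Char)) :
    PySem.Chars.join sep ((c :: p) :: L) = c :: PySem.Chars.join sep (p :: L) := by
  cases L with
  | nil => simp [PySem.Chars.join_singleton]
  | cons q rest => simp [PySem.Chars.join_cons_cons]

theorem dropWhile_head_false {p : Char → Bool} : ∀ {r d : List Char} {x : Char},
    r.dropWhile p = x :: d → p x = false
  | [], _, _, h => by simp at h
  | a :: t, d, x, h => by
    rw [List.dropWhile_cons] at h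
    by_cases hpa : p a = true
    · rw [if_pos hpa] at h; exact dropWhile_head_false h
    · rw [if_neg hpa] at h
      cases h
      simpa using hpa

-- B computes gSpec
theorem alt_list : ∀ (s : List Char),
    PySem.Chars.join [' '] ((PySem.Chars.splitOn s [' ']).map cutTok) = gSpec s := by
  intro s
  induction hn : s.length using Nat.strong_induction_on generalizing s with
  | _ n ih =>
  subst hn
  rw [chars_splitOn_single]
  cases s with
  | nil => simp [List.splitOn, gSpec, PySem.Chars.join_singleton, cutTok_eq]
  | cons x r =>
    by_cases hsp : x = ' '
    · subst hsp
      rw [show List.splitOn ' ' (' ' :: r) = [] :: List.splitOn ' ' r by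
        simp [List.splitOn, List.splitOnP_cons]]
      cases hs : List.splitOn ' ' r with
      | nil => exact absurd hs (by simp [List.splitOn]; exact List.splitOnP_ne_nil _ _)
      | cons h t =>
        simp only [List.map_cons, cutTok_eq, List.takeWhile_nil, PySem.Chars.join_cons_cons]
        have := ih r.length (by simp) r rfl
        rw [chars_splitOn_single, hs] at this
        simp only [List.map_cons, cutTok_eq] at this
        rw [show gSpec (' ' :: r) = ' ' :: gSpec r by simp [gSpec]]
        simpa using this
    · by_cases hhash : x = '#'
      · subst hhash
        rw [splitOn_char]
        have hdw : (('#' :: r).dropWhile (· ≠ ' ')) = r.dropWhile (· ≠ ' ') := by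
          simp [hsp]
        rw [hdw]
        have hto : (('#' :: r).takeWhile (fun x => x ≠ ' ')) = '#' :: r.takeWhile (· ≠ ' ') := by
          simp [hsp]
        rw [show gSpec ('#' :: r) = gSpec (r.dropWhile (· ≠ ' ')) by simp [gSpec]]
        cases hd : r.dropWhile (· ≠ ' ') with
        | nil =>
          simp [cutTok_eq, PySem.Chars.join_singleton, gSpec]
        | cons d rest =>
          have hdsp : d = ' ' := by
            have := dropWhile_head_false hd
            simpa using this
          subst hdsp
          simp only [hto, List.tail_cons, if_neg (List.cons_ne_nil _ _), List.map_cons,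
            cutTok_eq]
          have hlen : rest.length < (' ' :: r).length := by
            have h1 : (r.dropWhile (· ≠ ' ')).length ≤ r.length := List.length_dropWhile_le _ r
            have h2 := congrArg List.length hd
            simp only [List.length_cons] at h2
            simp only [List.length_cons]
            omega
          have := ih rest.length hlen rest rfl
          rw [chars_splitOn_single] at this
          cases hs : List.splitOn ' ' rest with
          | nil => exact absurd hs (by simp [List.splitOn]; exact List.splitOnP_ne_nil _ _)
          | cons h t =>
            rw [hs] at this
            simp only [List.map_cons, cutTok_eq] at this ⊢
            rw [show gSpec (' ' :: rest) = ' ' :: gSpec rest by simp [gSpec]]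
            simp only [PySem.Chars.join_cons_cons]
            simpa using this
      · rw [show List.splitOn ' ' (x :: r) =
            List.modifyHead (List.cons x) (List.splitOn ' ' r) by
          simp [List.splitOn, List.splitOnP_cons, hsp]]
        cases hs : List.splitOn ' ' r with
        | nil => exact absurd hs (by simp [List.splitOn]; exact List.splitOnP_ne_nil _ _)
        | cons h t =>
          simp only [List.modifyHead_cons, List.map_cons, cutTok_eq]
          rw [show (x :: h).takeWhile (· ≠ '#') = x :: h.takeWhile (· ≠ '#') by
            simp [hhash]]
          rw [join_cons_head]
          have := ih r.length (by simp) r rfl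
          rw [chars_splitOn_single, hs] at this
          simp only [List.map_cons, cutTok_eq] at this
          rw [show gSpec (x :: r) = x :: gSpec r by simp [gSpec, hhash]]
          rw [this]

-- --- A-side helpers ---

theorem singleton_infix_iff (c : Char) (l : List Char) : [c] <:+: l ↔ c ∈ l := by
  constructor
  · intro h; exact List.singleton_sublist.mp h.sublist
  · intro h
    rcases List.mem_iff_append.mp h with ⟨u, v, rfl⟩
    exact ⟨u, v, by simp⟩

theorem dropWhile_eq_drop_of_first (t : List Char) : ∀ (k : Nat),
    t[k]? = some ' ' → (∀ j, j < k → t[j]? ≠ some ' ') →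
    t.dropWhile (· ≠ ' ') = t.drop k := by
  induction t with
  | nil => intro k hk _; simp at hk
  | cons a r ih =>
    intro k hk hmin
    cases k with
    | zero =>
      simp at hk
      simp [hk]
    | succ m =>
      have ha : a ≠ ' ' := by
        intro h
        exact hmin 0 (by omega) (by simp [h])
      rw [List.dropWhile_cons, if_pos (by simpa using ha)]
      rw [List.drop_succ_cons]
      exact ih m (by simpa using hk) (fun j hj => by
        have := hmin (j + 1) (by omega)
        simpa using this)

-- A's loop computes take i ++ gSpec (drop i), given no '#' among the first i characters.
theorem loop_eq : ∀ (fuel : Nat) (s : List Char) (i : Nat), s.length + 1 ≤ fuel + i →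
    (∀ c ∈ s.take i, c ≠ '#') → rmhtLoop fuel s i = s.take i ++ gSpec (s.drop i) := by
  intro fuel
  induction fuel with
  | zero =>
    intro s i hn _
    rw [rmhtLoop]
    rw [List.take_of_length_le (by omega), List.drop_of_length_le (by omega)]
    simp [gSpec]
  | succ n ih =>
    intro s i hn hinv
    rw [rmhtLoop]
    by_cases hlt : i < s.length
    · rw [if_pos hlt]
      by_cases hh : PySem.Chars.pyGet? s (i : Int) = some '#'
      · rw [if_pos hh]
        have hhash : s[i]? = some '#' := by
          simpa [PySem.Chars.pyGet?_eq_listPyGet?, PySem.List.pyGet?_natCast] using hh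
        have hgeti : s[i]'hlt = '#' := by
          have := List.getElem?_eq_getElem hlt
          rw [this] at hhash; simpa using hhash
        by_cases hf : PySem.Chars.findFrom s [' '] (i : Int) none = -1
        · rw [if_pos hf]
          -- no space after i: the rest of the string is cut away
          rw [show PySem.Chars.slice s none (some (i : Int)) = s.take i by
            rw [PySem.Chars.slice_eq_listSlice,
              PySem.List.slice_to s (by positivity : (0:Int) ≤ (i:Int))]; simp]
          rw [ih (s.take i) (i + 1) (by simp only [List.length_take]; omega)
            (fun c hc => hinv c (by
              rw [List.take_of_length_le (by simp only [List.length_take]; omega)] at hc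
              exact hc))]
          rw [List.take_of_length_le (by simp only [List.length_take]; omega),
            List.drop_of_length_le (by simp only [List.length_take]; omega)]
          -- RHS: drop i s = '#' :: drop (i+1) s and no space remains
          have hnosp : PySem.Chars.find (s.drop i) [' '] = -1 := by
            by_contra hne2
            rw [PySem.Chars.findFrom_natCast s [' '] i (le_of_lt hlt), if_neg hne2] at hf
            have := PySem.Chars.neg_one_le_find (s.drop i) [' ']
            omega
          have hmem : ' ' ∉ s.drop i := by
            intro hm
            exact ((PySem.Chars.find_eq_neg_one_iff _ _).mp hnosp)
              ((singleton_infix_iff ' ' _).mpr hm)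
          rw [List.drop_eq_getElem_cons hlt, hgeti]
          rw [show gSpec ('#' :: s.drop (i + 1)) = gSpec ((s.drop (i + 1)).dropWhile (· ≠ ' '))
            by simp [gSpec]]
          rw [List.dropWhile_eq_nil_iff.mpr (fun x hx => by
            simp
            intro hxe
            subst hxe
            exact hmem (by rw [List.drop_eq_getElem_cons hlt]; exact List.mem_cons_of_mem _ hx))]
        · rw [if_neg hf]
          obtain ⟨k, hk, hik, hkl, hkval, hkmin⟩ := findFrom_space_spec s i hlt hhash hf
          rw [hk]
          rw [show PySem.Chars.slice s none (some (i : Int)) = s.take i by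
            rw [PySem.Chars.slice_eq_listSlice,
              PySem.List.slice_to s (by positivity : (0:Int) ≤ (i:Int))]; simp]
          rw [show PySem.Chars.slice s (some (k : Int)) none = s.drop k by
            rw [PySem.Chars.slice_eq_listSlice,
              PySem.List.slice_from s (by positivity : (0:Int) ≤ (k:Int))]; simp]
          have hgetk : s[k]'hkl = ' ' := by
            have := List.getElem?_eq_getElem hkl
            rw [this] at hkval; simpa using hkval
          have htake : (s.take i ++ s.drop k).take (i + 1) = s.take i ++ [' '] := by
            rw [List.take_append,
              List.take_of_length_le (by simp only [List.length_take]; omega)]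
            have hlen1 : i + 1 - (s.take i).length = 1 := by
              simp only [List.length_take]; omega
            rw [hlen1, List.drop_eq_getElem_cons hkl, hgetk]
            simp
          have hdrop : (s.take i ++ s.drop k).drop (i + 1) = s.drop (k + 1) := by
            rw [List.drop_append,
              List.drop_of_length_le (by simp only [List.length_take]; omega)]
            have hlen1 : i + 1 - (s.take i).length = 1 := by
              simp only [List.length_take]; omega
            rw [hlen1, List.nil_append, List.drop_drop]
          rw [ih (s.take i ++ s.drop k) (i + 1)
            (by simp only [List.length_append, List.length_take, List.length_drop]; omega)
            (by
              rw [htake]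
              intro c hc
              rcases List.mem_append.mp hc with h | h
              · exact hinv c h
              · simp at h; subst h; decide)]
          rw [htake, hdrop]
          -- RHS
          rw [List.drop_eq_getElem_cons hlt, hgeti]
          rw [show gSpec ('#' :: s.drop (i + 1)) = gSpec ((s.drop (i + 1)).dropWhile (· ≠ ' '))
            by simp [gSpec]]
          rw [dropWhile_eq_drop_of_first (s.drop (i + 1)) (k - (i + 1))
            (by rw [List.getElem?_drop]; rw [show i + 1 + (k - (i + 1)) = k by omega]; exact hkval)
            (fun j hj => by
              rw [List.getElem?_drop]
              exact hkmin (i + 1 + j) (by omega) (by omega))]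
          rw [List.drop_drop, show i + 1 + (k - (i + 1)) = k by omega]
          rw [List.drop_eq_getElem_cons hkl, hgetk]
          rw [show gSpec (' ' :: s.drop (k + 1)) = ' ' :: gSpec (s.drop (k + 1)) by
            simp [gSpec]]
          simp
      · rw [if_neg hh]
        have hne : s[i]'hlt ≠ '#' := by
          intro h
          apply hh
          rw [PySem.Chars.pyGet?_eq_listPyGet?, PySem.List.pyGet?_natCast,
            List.getElem?_eq_getElem hlt, h]
        rw [ih s (i + 1) (by omega)
          (by
            rw [List.take_add_one]
            intro c hc
            rcases List.mem_append.mp hc with h | h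
            · exact hinv c h
            · rw [List.getElem?_eq_getElem hlt] at h
              simp at h; subst h; exact hne)]
        have h1 : List.take (i + 1) s = List.take i s ++ [s[i]'hlt] := by
          rw [List.take_add_one, List.getElem?_eq_getElem hlt]; rfl
        have h2 : List.drop i s = s[i]'hlt :: List.drop (i + 1) s :=
          List.drop_eq_getElem_cons hlt
        have h3 : gSpec (s[i]'hlt :: List.drop (i + 1) s)
            = s[i]'hlt :: gSpec (List.drop (i + 1) s) := by
          rw [gSpec]
          rw [if_neg hne]
        rw [h2, h3, h1, List.append_assoc]
        rfl
    · rw [if_neg hlt]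
      rw [List.take_of_length_le (by omega), List.drop_of_length_le (by omega)]
      simp [gSpec]

-- ===== VERDICT (by name: the statement is the Claim_ definition above) =====
theorem rmht_spec : Claim_equal_rmht := by
  intro text _
  unfold Spec_rmht rmht rmht_alt
  rw [loop_eq (text.toList.length + 1) text.toList 0 (by omega) (by simp)]
  rw [alt_list]
  simp
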